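-- pv_equiv track=rewrite | github.com/abjonnes/aoc2024 | aoc/day6.py | parse_map
-- ===== SOURCE A (Python) =====
-- def parse_map(lines):
--     h = len(lines)
--     w = len(lines[0])
--     walls = {(r, c) for r, line in enumerate(lines) for c, char in enumerate(line) if char == "#"}
--     start = next(
--         (r, c) for r, line in enumerate(lines) for c, char in enumerate(line) if char == "^"
--     )
--
--     return h, w, walls, start
-- ===== SOURCE B (Python) =====
-- def parse_map(lines):
--     walls = set()
--     for r, line in enumerate(lines):
--         c = line.find("#")
--         while c != -1:
--             walls.add((r, c))
--             c = line.find("#", c + 1)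
--     start = next((r, line.find("^")) for r, line in enumerate(lines) if "^" in line)
--     return len(lines), len(lines[0]), walls, start
-- ===== Notes on version B (the rewrite author's own statement) =====
-- stated objective: alternative
-- what changed: Replaced A's per-character enumerate scans by substring-search: walls are collected with a str.find jump loop that visits only '#' occurrences, and the start is found by a per-line '"^" in line' membership test plus a single line.find('^'), with no per-character Python-level loop.
import Mathlib
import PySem

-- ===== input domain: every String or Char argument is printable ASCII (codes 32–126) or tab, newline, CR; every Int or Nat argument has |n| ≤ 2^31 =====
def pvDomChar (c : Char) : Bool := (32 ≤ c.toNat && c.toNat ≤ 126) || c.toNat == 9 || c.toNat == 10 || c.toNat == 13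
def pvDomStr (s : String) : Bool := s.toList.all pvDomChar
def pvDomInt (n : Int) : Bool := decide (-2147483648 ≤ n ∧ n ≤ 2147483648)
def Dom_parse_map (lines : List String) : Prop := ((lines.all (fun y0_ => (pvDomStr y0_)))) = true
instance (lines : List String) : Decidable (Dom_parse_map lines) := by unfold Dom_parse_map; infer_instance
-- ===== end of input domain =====

-- B replaces A's per-character enumerate scans by substring search: a str.find jump loop
-- collecting the '#' positions of each row, and a per-line "'^' in line" test plus one
-- line.find('^') for the start (objective: alternative).

-- ===== PORT A =====
def parse_map (lines : List String) : Int × Int × (List (Int × Int)) × (Int × Int) :=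
  let h : Int := lines.length
  -- lines[0]: IndexError when lines = [] is excluded by Pre_; default 0 is unreachable there
  let w : Int := match PySem.List.pyGet? lines 0 with
    | some line => PySem.Str.len line
    | none => 0
  let walls : PySem.Set (Int × Int) :=
    (PySem.List.enumerate lines).foldl (fun s rl =>
      (PySem.List.enumerate rl.2.toList).foldl (fun s cc =>
        if cc.2 == '#' then PySem.Set.add s (rl.1, cc.1) else s) s) PySem.Set.empty
  -- next(generator): first '^' in row-major order; StopIteration (none) excluded by Pre_
  let start : Option (Int × Int) :=
    (PySem.List.enumerate lines).findSome? (fun rl =>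
      ((PySem.List.enumerate rl.2.toList).find? (fun cc => cc.2 == '^')).map (fun cc => (rl.1, cc.1)))
  (h, w, walls, start.getD (0, 0))

-- ===== PORT B =====
-- 'while c != -1: walls.add((r, c)); c = line.find("#", c + 1)' — str.find(sub, start) is
-- PySem.Chars.findFrom on line.toList (exact: PySem.Str.findFrom_eq); fuel only guards
-- termination (each found index strictly grows, so length+1 steps always suffice).
def pvWallLoop (l : List Char) (r : Int) (fuel : Nat) (walls : PySem.Set (Int × Int)) (c : Int) : PySem.Set (Int × Int) :=
  match fuel with
  | 0 => walls
  | fuel + 1 =>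
    if c = -1 then walls
    else pvWallLoop l r fuel (PySem.Set.add walls (r, c)) (PySem.Chars.findFrom l ['#'] (c + 1))

def parse_map_alt (lines : List String) : Int × Int × (List (Int × Int)) × (Int × Int) :=
  let walls : PySem.Set (Int × Int) :=
    (PySem.List.enumerate lines).foldl (fun w rl =>
      pvWallLoop rl.2.toList rl.1 (rl.2.toList.length + 1) w (PySem.Chars.find rl.2.toList ['#'])) PySem.Set.empty
  -- next((r, line.find("^")) for r, line in enumerate(lines) if "^" in line)
  let start? : Option (Int × Int) :=
    ((PySem.List.enumerate lines).find? (fun rl => PySem.Chars.isIn ['^'] rl.2.toList)).map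
      (fun rl => (rl.1, PySem.Chars.find rl.2.toList ['^']))
  let w : Int := match PySem.List.pyGet? lines 0 with
    | some line => PySem.Str.len line
    | none => 0
  match start? with
  | some s => ((lines.length : Int), w, walls, s)
  | none => ((lines.length : Int), w, walls, (0, 0))  -- raise StopIteration; excluded by Pre_

-- ===== PRECONDITION & SPEC =====
-- Pre_ excludes exactly the inputs where Python A raises: [] (A: IndexError on lines[0],
-- B: StopIteration) and grids with no '^' (both raise StopIteration from next()).
def Pre_parse_map (lines : List String) : Prop :=
  lines ≠ [] ∧ ∃ s ∈ lines, '^' ∈ s.toList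
instance (lines : List String) : Decidable (Pre_parse_map lines) := by unfold Pre_parse_map; infer_instance
def pvWitness_parse_map : List String := ["#.", ".^"]
def Spec_parse_map (lines : List String) (out : Int × Int × (List (Int × Int)) × (Int × Int)) : Prop := out = parse_map_alt lines
instance (lines : List String) (out : Int × Int × (List (Int × Int)) × (Int × Int)) : Decidable (Spec_parse_map lines out) := by unfold Spec_parse_map; infer_instance

-- ===== CLAIM (what is proved, stated in full; the proofs are below) =====
def Claim_equal_parse_map : Prop := ∀ (lines : List String), Dom_parse_map lines → Pre_parse_map lines → Spec_parse_map lines (parse_map lines)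

-- ===== LEMMAS AND PROOFS =====

theorem pv_sing_prefix (a : Char) (m : List Char) : [a] <+: m ↔ ∃ t, m = a :: t := by
  cases m with
  | nil => simp
  | cons b t => constructor
                · intro h
                  rcases List.cons_prefix_cons.mp h with ⟨rfl, _⟩
                  exact ⟨t, rfl⟩
                · rintro ⟨t', ht⟩
                  cases ht
                  exact List.cons_prefix_cons.mpr ⟨rfl, List.nil_prefix⟩

theorem pv_sing_infix (a : Char) (m : List Char) : [a] <:+: m ↔ a ∈ m := by
  constructor
  · rintro ⟨p, q, rfl⟩; simp
  · intro h
    rcases List.append_of_mem h with ⟨p, q, rfl⟩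
    exact ⟨p, q, by simp⟩

-- A's inner walls fold ignores a '#'-free prefix of the row.
theorem pv_skip (r : Int) : ∀ (n : Nat) (m : List Char) (i0 : Int) (s : PySem.Set (Int × Int)),
    (∀ (i : Nat) (_hi : i < n) (hm : i < m.length), m[i] ≠ '#') →
    (PySem.List.enumerate m i0).foldl (fun s cc => if cc.2 = '#' then PySem.Set.add s (r, cc.1) else s) s
    = (PySem.List.enumerate (m.drop n) (i0 + n)).foldl (fun s cc => if cc.2 = '#' then PySem.Set.add s (r, cc.1) else s) s := by
  intro n
  induction n with
  | zero => intro m i0 s _; simp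
  | succ n ih =>
    intro m i0 s hns
    cases m with
    | nil => simp [PySem.List.enumerate]
    | cons c tl =>
      have hc : c ≠ '#' := by
        have := hns 0 (Nat.succ_pos n) (by simp)
        simpa using this
      rw [PySem.List.enumerate_cons, List.foldl_cons]
      simp only [hc, if_false]
      have hd : List.drop (n + 1) (c :: tl) = List.drop n tl := rfl
      have hidx : i0 + ((n + 1 : Nat) : Int) = (i0 + 1) + (n : Int) := by push_cast; ring
      rw [hd, hidx]
      exact ih tl (i0 + 1) s (fun i hi hm => by
        have := hns (i + 1) (by omega) (by simpa using Nat.succ_lt_succ hm)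
        simpa using this)

-- B's find-jump loop over one row, started at search position k, equals A's fold over
-- the row's remaining enumerated suffix.
theorem pv_row (r : Int) (l : List Char) : ∀ (fuel k : Nat) (s : PySem.Set (Int × Int)),
    k ≤ l.length → l.length - k < fuel →
    pvWallLoop l r fuel s (PySem.Chars.findFrom l ['#'] (k : Int))
    = (PySem.List.enumerate (l.drop k) (k : Int)).foldl (fun s cc => if cc.2 = '#' then PySem.Set.add s (r, cc.1) else s) s := by
  intro fuel
  induction fuel with
  | zero => intro k s _ h; omega
  | succ fuel ih =>
    intro k s hk hfuel
    rw [PySem.Chars.findFrom_natCast l ['#'] k hk]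
    by_cases hfind : PySem.Chars.find (List.drop k l) ['#'] = -1
    · -- no '#' left: loop exits, fold adds nothing
      rw [if_pos hfind]
      have hnin : '#' ∉ List.drop k l := by
        have := (PySem.Chars.find_eq_neg_one_iff (List.drop k l) ['#']).mp hfind
        exact fun hm => this ((pv_sing_infix '#' _).mpr hm)
      rw [pvWallLoop, if_pos rfl]
      have hskip := pv_skip r (List.drop k l).length (List.drop k l) (k : Int) s
        (fun i hi hm => fun h => hnin (h ▸ List.getElem_mem hm))
      rw [hskip, List.drop_length]
      simp [PySem.List.enumerate]
    · -- '#' found at offset j in the suffix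
      rw [if_neg hfind]
      have hj0 : 0 ≤ PySem.Chars.find (List.drop k l) ['#'] := by
        have := PySem.Chars.neg_one_le_find (List.drop k l) ['#']
        omega
      obtain ⟨hpre, hmin⟩ := PySem.Chars.find_spec hj0
      set jn : Nat := (PySem.Chars.find (List.drop k l) ['#']).toNat with hjn
      have hfd : PySem.Chars.find (List.drop k l) ['#'] = (jn : Int) := by omega
      obtain ⟨t, ht⟩ := (pv_sing_prefix '#' _).mp hpre
      have hjlt : jn < l.length - k := by
        have h2 := congrArg List.length ht
        simp only [List.length_drop, List.length_cons] at h2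
        omega
      rw [hfd, pvWallLoop, if_neg (by omega)]
      have harg : ((k : Int) + jn + 1) = ((k + jn + 1 : Nat) : Int) := by push_cast; ring
      rw [harg, ih (k + jn + 1) _ (by omega) (by omega)]
      have hskip := pv_skip r jn (List.drop k l) (k : Int) s (fun i hi hm => by
        intro hEq
        exact hmin i hi ((pv_sing_prefix '#' _).mpr
          ⟨List.drop (i + 1) (List.drop k l), by
            rw [← hEq]
            exact (List.getElem_cons_drop hm).symm⟩))
      rw [hskip, ht, PySem.List.enumerate_cons, List.foldl_cons]
      have h1 : List.drop (jn + 1) (List.drop k l) = t := by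
        have := congrArg (List.drop 1) ht
        simpa [List.drop_drop, Nat.one_add] using this
      have htt : List.drop (k + jn + 1) l = t := by
        rw [← h1, List.drop_drop, Nat.add_assoc]
      have hidx : ((k + jn + 1 : Nat) : Int) = (k : Int) + (jn : Int) + 1 := by push_cast; ring
      rw [htt, hidx]
      simp

-- A's inner start search over a row with no '^' finds nothing.
theorem pv_find_no (m : List Char) (h : '^' ∉ m) : ∀ (i0 : Int),
    (PySem.List.enumerate m i0).find? (fun cc => cc.2 == '^') = none := by
  induction m with
  | nil => intro i0; simp [PySem.List.enumerate]
  | cons c tl ih =>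
    intro i0
    have hc : c ≠ '^' := fun hEq => h (hEq ▸ List.mem_cons_self)
    rw [PySem.List.enumerate_cons, List.find?_cons_of_neg (by simpa using hc)]
    exact ih (fun hm => h (List.mem_cons_of_mem _ hm)) (i0 + 1)

-- A's inner start search finds the first '^', at offset n, as (i0 + n, '^').
theorem pv_find_at : ∀ (n : Nat) (m : List Char) (i0 : Int) (hn : n < m.length),
    m[n] = '^' → (∀ (i : Nat) (hi : i < n), m[i]'(by omega) ≠ '^') →
    (PySem.List.enumerate m i0).find? (fun cc => cc.2 == '^') = some (i0 + n, '^') := by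
  intro n
  induction n with
  | zero =>
    intro m i0 hn hm _
    cases m with
    | nil => simp at hn
    | cons c tl =>
      simp only [List.getElem_cons_zero] at hm
      rw [PySem.List.enumerate_cons, List.find?_cons_of_pos (by simpa using hm)]
      simp [hm]
  | succ n ih =>
    intro m i0 hn hm hmin
    cases m with
    | nil => simp at hn
    | cons c tl =>
      have hc : c ≠ '^' := by
        have := hmin 0 (Nat.succ_pos n)
        simpa using this
      rw [PySem.List.enumerate_cons, List.find?_cons_of_neg (by simpa using hc)]
      have hidx : i0 + ((n + 1 : Nat) : Int) = (i0 + 1) + (n : Int) := by push_cast; ring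
      rw [hidx]
      exact ih tl (i0 + 1) (by simpa using hn) (by simpa using hm)
        (fun i hi => by have := hmin (i + 1) (by omega); simpa using this)

-- Per row: A's mapped first-'^' search = B's membership test + find.
theorem pv_rowStart (l : List Char) (r : Int) :
    ((PySem.List.enumerate l).find? (fun cc => cc.2 == '^')).map (fun cc => (r, cc.1))
    = if PySem.Chars.isIn ['^'] l = true then some (r, PySem.Chars.find l ['^']) else none := by
  by_cases h : PySem.Chars.isIn ['^'] l = true
  · rw [if_pos h]
    have hinf : ['^'] <:+: l := (PySem.Chars.isIn_iff_infix ['^'] l).mp h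
    have hj0 : 0 ≤ PySem.Chars.find l ['^'] := (PySem.Chars.find_nonneg_iff l ['^']).mpr hinf
    obtain ⟨hpre, hmin⟩ := PySem.Chars.find_spec hj0
    set jn : Nat := (PySem.Chars.find l ['^']).toNat with hjn
    obtain ⟨t, ht⟩ := (pv_sing_prefix '^' _).mp hpre
    have hjlt : jn < l.length := by
      have : (List.drop jn l).length = t.length + 1 := by rw [ht]; simp
      simp only [List.length_drop] at this
      omega
    have hat : l[jn] = '^' := by
      have h2 := List.getElem_cons_drop hjlt
      rw [ht] at h2
      exact (List.cons_eq_cons.mp h2).1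
    have : (PySem.List.enumerate l).find? (fun cc => cc.2 == '^') = some ((0 : Int) + jn, '^') :=
      pv_find_at jn l 0 hjlt hat (fun i hi => by
        intro hEq
        exact hmin i hi ((pv_sing_prefix '^' _).mpr
          ⟨List.drop (i + 1) l, by
            rw [← hEq]
            exact (List.getElem_cons_drop (by omega)).symm⟩))
    rw [this]
    simp only [Option.map_some]
    congr 1
    simp [hjn, Int.toNat_of_nonneg hj0]
  · rw [if_neg h]
    have hnin : '^' ∉ l := fun hm =>
      (PySem.Chars.isIn_eq_false_iff ['^'] l).mp (by simpa using h) ((pv_sing_infix '^' l).mpr hm)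
    rw [pv_find_no l hnin 0]
    rfl

-- Across rows: A's findSome? = B's find?-then-map.
theorem pv_outer_start : ∀ (L : List (Int × String)),
    L.findSome? (fun rl =>
      ((PySem.List.enumerate rl.2.toList).find? (fun cc => cc.2 == '^')).map (fun cc => (rl.1, cc.1)))
    = (L.find? (fun rl => PySem.Chars.isIn ['^'] rl.2.toList)).map
        (fun rl => (rl.1, PySem.Chars.find rl.2.toList ['^'])) := by
  intro L
  induction L with
  | nil => rfl
  | cons hd tl ih =>
    rw [List.findSome?_cons, pv_rowStart hd.2.toList hd.1]
    by_cases h : PySem.Chars.isIn ['^'] hd.2.toList = true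
    · rw [if_pos h]
      have hf : List.find? (fun rl => PySem.Chars.isIn ['^'] rl.2.toList) (hd :: tl) = some hd :=
        List.find?_cons_of_pos h
      rw [hf]
      simp
    · rw [if_neg h]
      have hf : List.find? (fun rl => PySem.Chars.isIn ['^'] rl.2.toList) (hd :: tl)
          = List.find? (fun rl => PySem.Chars.isIn ['^'] rl.2.toList) tl :=
        List.find?_cons_of_neg (by simpa using h)
      rw [hf, ← ih]

-- Across rows: B's find-jump folds = A's nested enumerate folds.
theorem pv_outer_walls : ∀ (L : List (Int × String)) (s : PySem.Set (Int × Int)),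
    L.foldl (fun w rl =>
      pvWallLoop rl.2.toList rl.1 (rl.2.toList.length + 1) w (PySem.Chars.find rl.2.toList ['#'])) s
    = L.foldl (fun w rl =>
        (PySem.List.enumerate rl.2.toList).foldl (fun w cc =>
          if cc.2 = '#' then PySem.Set.add w (rl.1, cc.1) else w) w) s := by
  intro L
  induction L with
  | nil => intro s; rfl
  | cons hd tl ih =>
    intro s
    rw [List.foldl_cons, List.foldl_cons, ← ih]
    congr 1
    have h0 : PySem.Chars.find hd.2.toList ['#'] = PySem.Chars.findFrom hd.2.toList ['#'] ((0 : Nat) : Int) := by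
      simp
    rw [h0, pv_row hd.1 hd.2.toList (hd.2.toList.length + 1) 0 s (by omega) (by omega)]
    simp

-- ===== VERDICT (by name: the statement is the Claim_ definition above) =====
theorem parse_map_spec : Claim_equal_parse_map := by
  intro lines _ _
  show parse_map lines = parse_map_alt lines
  unfold parse_map parse_map_alt
  simp only [beq_iff_eq]
  rw [pv_outer_walls, pv_outer_start]
  cases hs : (PySem.List.enumerate lines).find? (fun rl => PySem.Chars.isIn ['^'] rl.2.toList) <;> simp
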